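-- pv_equiv track=rewrite | github.com/sanjarahmadov/Algorithms | Clique Percolation/clique_percolation.py | degeneracy_ordering
-- ===== SOURCE A (Python) =====
-- def degeneracy_ordering(G):
-- 	deg_G = {}
-- 	degenerate_order = []
-- 	for key, value in G.items():
-- 		deg_G[key] = len(value)
--
-- 	# Ordering where vertice with lowest degree comes first
-- 	while len(deg_G) > 0:
-- 		v = min(deg_G.items(), key = lambda x: x[1])[0]
-- 		degenerate_order.append(v)
-- 		del deg_G[v]
-- 		for i in G[v]:
-- 			if i in deg_G:
-- 				deg_G[i] -= 1
-- 	return degenerate_order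
-- ===== SOURCE B (Python) =====
-- def degeneracy_ordering(G):
--     # Lazy priority queue: a descending-sorted list of (degree, insertion index,
--     # vertex) entries; the smallest entry sits at the end, so each extraction is
--     # an O(1) pq.pop().  When a neighbour's degree drops, a fresh entry is pushed
--     # (binary-searched into place) and the old one becomes stale; stale entries
--     # (dead vertex or outdated degree) are skipped on extraction instead of being
--     # searched for.
--     idx = {}
--     for v in G:
--         idx[v] = len(idx)
--     cur = {v: len(adj) for v, adj in G.items()}
--     pq = []
--     for v, d in cur.items():
--         _pq_push(pq, (d, idx[v], v))
--     order = []
--     while cur: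
--         d, i, v = pq.pop()
--         if v not in cur or d != cur[v]:
--             continue  # stale entry
--         order.append(v)
--         del cur[v]
--         for u in G[v]:
--             if u in cur:
--                 cur[u] -= 1
--                 _pq_push(pq, (cur[u], idx[u], u))
--     return order
--
--
-- def _pq_push(pq, e):
--     # insert e into the descending-sorted list pq (binary search for the position)
--     lo, hi = 0, len(pq)
--     while lo < hi:
--         mid = (lo + hi) // 2
--         if pq[mid] < e:
--             hi = mid
--         else:
--             lo = mid + 1
--     pq.insert(lo, e)
-- ===== Notes on version B (the rewrite author's own statement) =====
-- stated objective: faster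
-- what changed: A rescans the whole live degree dict with min() every round; B keeps a lazy priority queue - a descending-sorted list of (degree, insertion index, vertex) entries popped O(1) from the end, with binary-searched insertion of fresh entries on each decrement and stale entries skipped on extraction - so no per-round full scan remains.
import Mathlib
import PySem

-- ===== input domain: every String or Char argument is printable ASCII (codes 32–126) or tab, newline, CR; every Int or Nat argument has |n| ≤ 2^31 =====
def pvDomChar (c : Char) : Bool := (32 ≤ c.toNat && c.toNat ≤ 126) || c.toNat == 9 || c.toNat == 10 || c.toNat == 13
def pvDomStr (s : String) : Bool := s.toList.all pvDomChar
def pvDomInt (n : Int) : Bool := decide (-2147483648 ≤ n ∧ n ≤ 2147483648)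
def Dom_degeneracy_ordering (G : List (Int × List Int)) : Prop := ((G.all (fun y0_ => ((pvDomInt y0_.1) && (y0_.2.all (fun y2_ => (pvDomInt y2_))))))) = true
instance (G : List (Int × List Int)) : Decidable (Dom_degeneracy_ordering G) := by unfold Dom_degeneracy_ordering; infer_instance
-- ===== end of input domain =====

-- B replaces A's per-round min-scan of the live degree dict by a lazy priority queue:
-- a descending-sorted list of (degree, insertion index, vertex) entries popped from the
-- end, stale entries skipped; objective: faster (fewer scanned entries per extraction).

-- ===== PORT A =====
-- termination helpers for the while-loop of A (cited by decreasing_by)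
theorem pvFoldStepA_size (L : List Int) (d : PySem.Dict Int Int) :
    (L.foldl (fun d i => if d.contains i then d.modify i 0 (· - 1) else d) d).size = d.size := by
  induction L generalizing d with
  | nil => rfl
  | cons u t ih =>
    simp only [List.foldl_cons]
    rw [ih]
    by_cases h : d.contains u
    · simp [h, PySem.Dict.modify, PySem.Dict.insert, PySem.Dict.size]
    · simp [h]

theorem pvErase_size_lt (d : PySem.Dict Int Int) (v : Int) (h : d.contains v = true) :
    (d.erase v).size < d.size := by
  simp only [PySem.Dict.erase, PySem.Dict.size]
  rw [List.length_filter_lt_length_iff_exists]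
  simp only [PySem.Dict.contains, List.any_eq_true] at h
  obtain ⟨p, hp, he⟩ := h
  exact ⟨p, hp, by simp [he]⟩

-- while len(deg_G) > 0: pick min (first minimal in dict order), delete it, decrement remaining neighbours
def pvDegLoopA (Gd : PySem.Dict Int (List Int)) (deg : PySem.Dict Int Int)
    (acc : List Int) : List Int :=
  match h : PySem.List.min? deg.items (fun x => x.2) with
  | none => acc
  | some m =>
      pvDegLoopA Gd
        ((Gd.getD m.1 []).foldl (fun d i => if d.contains i then d.modify i 0 (· - 1) else d)
          (deg.erase m.1))
        (acc ++ [m.1])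
termination_by deg.size
decreasing_by
  simp only [dite_eq_ite]
  rw [pvFoldStepA_size]
  refine pvErase_size_lt _ _ ?_
  have hm := PySem.List.min?_mem h
  simp only [PySem.Dict.contains, List.any_eq_true]
  exact ⟨m, hm, by simp⟩

-- G arrives as an association list; the Python function receives it as a dict (G[v] = getD, v always a key).
def degeneracy_ordering (G : List (Int × List Int)) : List Int :=
  let Gd := PySem.Dict.ofList G
  let deg := Gd.items.foldl (fun d p => d.insert p.1 ((p.2.length : Int))) PySem.Dict.empty
  pvDegLoopA Gd deg []

-- ===== PORT B =====
-- Python's '<' on the int triples (degree, index, vertex): lexicographic comparison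
def pvLtb (a b : Int × Int × Int) : Bool :=
  a.1 < b.1 || (a.1 == b.1 && (a.2.1 < b.2.1 || (a.2.1 == b.2.1 && a.2.2 < b.2.2)))

-- _pq_push's binary search: while lo < hi: mid = (lo+hi)//2; if pq[mid] < e: hi = mid else lo = mid+1
-- (the first Nat argument is a structural fuel ≥ hi - lo, the number of remaining loop rounds)
def pvPushPos (pq : List (Int × Int × Int)) (e : Int × Int × Int) : Nat → Nat → Nat → Nat
  | 0, lo, _ => lo
  | n + 1, lo, hi =>
    if lo < hi then
      if pvLtb (pq.getD ((lo + hi) / 2) (0, 0, 0)) e then pvPushPos pq e n lo ((lo + hi) / 2)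
      else pvPushPos pq e n ((lo + hi) / 2 + 1) hi
    else lo

-- _pq_push: pq.insert(lo, e)
def pvPush (pq : List (Int × Int × Int)) (e : Int × Int × Int) : List (Int × Int × Int) :=
  PySem.List.insert pq ((pvPushPos pq e pq.length 0 pq.length : Nat) : Int) e

-- totality guard for the while-loop (a bound on the number of iterations it can make:
-- pending queue entries plus, per live vertex, one extraction and its adjacency pushes)
def pvW (Gd : PySem.Dict Int (List Int)) (cur : PySem.Dict Int Int) : Nat :=
  (cur.keys.map (fun k => 1 + (Gd.getD k []).length)).sum

-- while cur: pop the last (smallest) entry, skip it if stale, else emit the vertex,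
-- delete it and push a fresh entry for every decremented live neighbour
def pvLoopB (Gd : PySem.Dict Int (List Int)) (idx : PySem.Dict Int Int) :
    Nat → PySem.Dict Int Int → List (Int × Int × Int) → List Int → List Int
  | 0, _, _, order => order
  | fuel + 1, cur, pq, order =>
    if cur.size = 0 then order
    else
      match pq.getLast? with
      | none => order   -- unreachable: pq holds one live entry per live vertex
      | some e =>
        let pq1 := pq.dropLast
        if !(cur.contains e.2.2) || !(e.1 == cur.getD e.2.2 0) then
          pvLoopB Gd idx fuel cur pq1 order
        else
          let cur1 := cur.erase e.2.2
          let s := (Gd.getD e.2.2 []).foldl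
            (fun (s : PySem.Dict Int Int × List (Int × Int × Int)) u =>
              if s.1.contains u then
                let c := s.1.modify u 0 (· - 1)
                (c, pvPush s.2 (c.getD u 0, idx.getD u 0, u))
              else s) (cur1, pq1)
          pvLoopB Gd idx fuel s.1 s.2 (order ++ [e.2.2])

def degeneracy_ordering_alt (G : List (Int × List Int)) : List Int :=
  let Gd := PySem.Dict.ofList G
  let idx := Gd.keys.foldl (fun d v => d.insert v ((d.size : Int))) PySem.Dict.empty
  let cur := Gd.items.foldl (fun d p => d.insert p.1 ((p.2.length : Int))) PySem.Dict.empty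
  let pq := cur.items.foldl (fun pq p => pvPush pq (p.2, idx.getD p.1 0, p.1)) []
  pvLoopB Gd idx (pq.length + pvW Gd cur) cur pq []

-- ===== PRECONDITION & SPEC =====
def Spec_degeneracy_ordering (G : List (Int × List Int)) (out : List Int) : Prop := out = degeneracy_ordering_alt G
instance (G : List (Int × List Int)) (out : List Int) : Decidable (Spec_degeneracy_ordering G out) := by unfold Spec_degeneracy_ordering; infer_instance

-- ===== CLAIM (what is proved, stated in full; the proofs are below) =====
def Claim_equal_degeneracy_ordering : Prop := ∀ (G : List (Int × List Int)), Dom_degeneracy_ordering G → Spec_degeneracy_ordering G (degeneracy_ordering G)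

-- ===== LEMMAS AND PROOFS =====

-- the lexicographic key of a queue entry
def pvKey (e : Int × Int × Int) : Lex (Int × Lex (Int × Int)) := toLex (e.1, toLex (e.2.1, e.2.2))

theorem pvLtb_iff (a b : Int × Int × Int) : pvLtb a b = true ↔ pvKey a < pvKey b := by
  simp [pvLtb, pvKey, Prod.Lex.lt_iff]

theorem pvLtb_eq_false_iff (a b : Int × Int × Int) : pvLtb a b = false ↔ pvKey b ≤ pvKey a := by
  rw [← not_lt, ← pvLtb_iff]
  simp

-- the queue invariant: entries are (non-strictly) descending in the lexicographic key
def PQSorted (pq : List (Int × Int × Int)) : Prop :=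
  List.Pairwise (fun a b => pvKey b ≤ pvKey a) pq

theorem pvPushPos_bounds (pq : List (Int × Int × Int)) (e : Int × Int × Int) :
    ∀ n lo hi, hi - lo ≤ n → lo ≤ hi → lo ≤ pvPushPos pq e n lo hi ∧ pvPushPos pq e n lo hi ≤ hi := by
  intro n
  induction n with
  | zero =>
    intro lo hi h1 h2
    rw [pvPushPos]
    omega
  | succ n ih =>
    intro lo hi h1 h2
    rw [pvPushPos]
    by_cases hlt : lo < hi
    · rw [if_pos hlt]
      cases hP : pvLtb (pq.getD ((lo + hi) / 2) (0, 0, 0)) e with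
      | true =>
        rw [if_pos rfl]
        have := ih lo ((lo + hi) / 2) (by omega) (by omega)
        omega
      | false =>
        rw [if_neg Bool.false_ne_true]
        have := ih ((lo + hi) / 2 + 1) hi (by omega) (by omega)
        omega
    · rw [if_neg hlt]; omega

theorem pvPushPos_spec (pq : List (Int × Int × Int)) (e : Int × Int × Int)
    (hmono : ∀ j k (_ : j < pq.length) (hk : k < pq.length), j ≤ k →
      pvLtb pq[j] e = true → pvLtb pq[k] e = true) :
    ∀ n lo hi, hi - lo ≤ n → lo ≤ hi → hi ≤ pq.length →
    (∀ k (hk : k < pq.length), k < lo → pvLtb pq[k] e = false) →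
    (∀ k (hk : k < pq.length), hi ≤ k → pvLtb pq[k] e = true) →
    (∀ k (hk : k < pq.length), k < pvPushPos pq e n lo hi → pvLtb pq[k] e = false) ∧
    (∀ k (hk : k < pq.length), pvPushPos pq e n lo hi ≤ k → pvLtb pq[k] e = true) := by
  intro n
  induction n with
  | zero =>
    intro lo hi h1 h2 hhi hlo hhiP
    rw [pvPushPos]
    exact ⟨fun k hk hklo => hlo k hk hklo, fun k hk hlok => hhiP k hk (by omega)⟩
  | succ n ih =>
    intro lo hi h1 h2 hhi hlo hhiP
    rw [pvPushPos]
    by_cases hlt : lo < hi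
    · rw [if_pos hlt]
      have hmlen : (lo + hi) / 2 < pq.length := by omega
      have hget : pq.getD ((lo + hi) / 2) (0, 0, 0) = pq[(lo + hi) / 2] :=
        List.getD_eq_getElem pq (0, 0, 0) hmlen
      rw [hget]
      cases hP : pvLtb pq[(lo + hi) / 2] e with
      | true =>
        rw [if_pos rfl]
        exact ih lo ((lo + hi) / 2) (by omega) (by omega) (by omega) hlo
          (fun k hk hmk => hmono ((lo + hi) / 2) k hmlen hk hmk hP)
      | false =>
        rw [if_neg Bool.false_ne_true]
        refine ih ((lo + hi) / 2 + 1) hi (by omega) (by omega) hhi ?_ hhiP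
        intro k hk hkm
        cases hkP : pvLtb pq[k] e with
        | true =>
          have := hmono k ((lo + hi) / 2) hk hmlen (by omega) hkP
          rw [this] at hP
          cases hP
        | false => rfl
    · rw [if_neg hlt]
      exact ⟨fun k hk hklo => hlo k hk hklo, fun k hk hlok => hhiP k hk (by omega)⟩

theorem pvPush_eq (pq : List (Int × Int × Int)) (e : Int × Int × Int) :
    pvPush pq e = pq.take (pvPushPos pq e pq.length 0 pq.length) ++ e :: pq.drop (pvPushPos pq e pq.length 0 pq.length) := by
  have hb := pvPushPos_bounds pq e pq.length 0 pq.length (by omega) (by omega)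
  unfold pvPush
  exact PySem.List.insert_natCast pq _ e hb.2

theorem mem_pvPush (pq : List (Int × Int × Int)) (e x : Int × Int × Int) :
    x ∈ pvPush pq e ↔ x = e ∨ x ∈ pq := by
  have hx : x ∈ List.take (pvPushPos pq e pq.length 0 pq.length) pq
      ∨ x ∈ List.drop (pvPushPos pq e pq.length 0 pq.length) pq ↔ x ∈ pq := by
    rw [← List.mem_append, List.take_append_drop]
  rw [pvPush_eq]
  simp only [List.mem_append, List.mem_cons]
  rw [← hx]
  tauto

theorem length_pvPush (pq : List (Int × Int × Int)) (e : Int × Int × Int) :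
    (pvPush pq e).length = pq.length + 1 := by
  have hb := pvPushPos_bounds pq e pq.length 0 pq.length (by omega) (by omega)
  rw [pvPush_eq]
  simp

theorem pvPush_sorted (pq : List (Int × Int × Int)) (e : Int × Int × Int)
    (hs : PQSorted pq) : PQSorted (pvPush pq e) := by
  have hmono : ∀ j k (_ : j < pq.length) (hk : k < pq.length), j ≤ k →
      pvLtb pq[j] e = true → pvLtb pq[k] e = true := by
    intro j k hj hk hjk hP
    rcases Nat.eq_or_lt_of_le hjk with rfl | hlt
    · exact hP
    · have hle := List.pairwise_iff_getElem.mp hs j k hj hk hlt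
      rw [pvLtb_iff] at hP ⊢
      exact lt_of_le_of_lt hle hP
  obtain ⟨hpre, hpost⟩ := pvPushPos_spec pq e hmono pq.length 0 pq.length (by omega) (by omega)
    le_rfl (fun k hk h => by omega) (fun k hk h => by omega)
  have hb := pvPushPos_bounds pq e pq.length 0 pq.length (by omega) (by omega)
  set r := pvPushPos pq e pq.length 0 pq.length with hr
  have hrle : r ≤ pq.length := hb.2
  rw [pvPush_eq, ← hr]
  unfold PQSorted
  rw [List.pairwise_append]
  refine ⟨List.Pairwise.sublist (List.take_sublist _ _) hs, ?_, ?_⟩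
  · rw [List.pairwise_cons]
    constructor
    · intro b hbm
      obtain ⟨i, hi, hieq⟩ := List.getElem_of_mem hbm
      have hlend : (List.drop r pq).length = pq.length - r := by simp
      have hidx : r + i < pq.length := by omega
      have hbe : b = pq[r + i] := by rw [← hieq, List.getElem_drop]
      have hP := hpost (r + i) hidx (by omega)
      rw [pvLtb_iff] at hP
      rw [hbe]
      exact le_of_lt hP
    · exact List.Pairwise.sublist (List.drop_sublist _ _) hs
  · intro a ha b hbm
    obtain ⟨i, hi, hieq⟩ := List.getElem_of_mem ha
    have hlent : (List.take r pq).length = min r pq.length := by simp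
    have hir : i < r := by omega
    have hilen : i < pq.length := by omega
    have hae : a = pq[i] := by rw [← hieq, List.getElem_take]
    have hif : pvLtb pq[i] e = false := hpre i hilen hir
    rw [pvLtb_eq_false_iff] at hif
    rcases List.mem_cons.mp hbm with rfl | hbd
    · rw [hae]
      exact hif
    · obtain ⟨j, hj, hjeq⟩ := List.getElem_of_mem hbd
      have hlend : (List.drop r pq).length = pq.length - r := by simp
      have hjdx : r + j < pq.length := by omega
      have hbe : b = pq[r + j] := by rw [← hjeq, List.getElem_drop]
      have hP := hpost (r + j) hjdx (by omega)
      rw [pvLtb_iff] at hP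
      rw [hae, hbe]
      exact le_trans (le_of_lt hP) hif

-- first-minimum characterisation of Python's min(items, key=...)
theorem pvMinStay {α : Type} (key : α → Int) (f : Option α → α → Option α)
    (hf : ∀ (a x : α), f (some a) x = if key x < key a then some x else some a) (m : α) :
    ∀ (t : List α), (∀ p ∈ t, ¬ key p < key m) → List.foldl f (some m) t = some m := by
  intro t
  induction t with
  | nil => intro _; rfl
  | cons y s ih =>
    intro h
    rw [List.foldl_cons, hf, if_neg (h y (by simp))]
    exact ih (fun p hp => h p (by simp [hp]))

theorem pvMinGo {α : Type} (key pos : α → Int) (f : Option α → α → Option α)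
    (hf : ∀ (a x : α), f (some a) x = if key x < key a then some x else some a) :
    ∀ (t : List α) (a m : α), List.Pairwise (fun x y => pos x < pos y) t →
    m ∈ t → key m < key a →
    (∀ p ∈ t, key m < key p ∨ (key m = key p ∧ pos m ≤ pos p)) →
    List.foldl f (some a) t = some m := by
  intro t
  induction t with
  | nil => intro a m _ hm; cases hm
  | cons y s ih =>
    intro a m hpair hm hka hcond
    rw [List.foldl_cons, hf]
    by_cases hym : y = m
    · subst hym
      rw [if_pos hka]
      refine pvMinStay key f hf y s ?_
      intro p hp
      rcases hcond p (by simp [hp]) with h | ⟨h1, _⟩ <;> omega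
    · have hm' : m ∈ s := by
        rcases List.mem_cons.mp hm with rfl | h
        · exact absurd rfl hym
        · exact h
      have hky : key m < key y := by
        rcases hcond y (by simp) with h | ⟨h1, h2⟩
        · exact h
        · exfalso
          have : pos y < pos m := (List.pairwise_cons.mp hpair).1 m hm'
          omega
      have hcond' : ∀ p ∈ s, key m < key p ∨ (key m = key p ∧ pos m ≤ pos p) :=
        fun p hp => hcond p (by simp [hp])
      by_cases hya : key y < key a
      · rw [if_pos hya]
        exact ih y m (List.pairwise_cons.mp hpair).2 hm' hky hcond'
      · rw [if_neg hya]
        exact ih a m (List.pairwise_cons.mp hpair).2 hm' hka hcond'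

theorem pvMinFirst {α : Type} (key pos : α → Int) (l : List α) (m : α)
    (hl : List.Pairwise (fun a b => pos a < pos b) l) (hm : m ∈ l)
    (hmin : ∀ p ∈ l, key m < key p ∨ (key m = key p ∧ pos m ≤ pos p)) :
    PySem.List.min? l key = some m := by
  unfold PySem.List.min?
  cases l with
  | nil => cases hm
  | cons x t =>
    rw [List.foldl_cons]
    show List.foldl _ (some x) t = some m
    have hf : ∀ (a y : α),
        (fun (acc : Option α) (x : α) => match acc with
          | none => some x
          | some m => if key x < key m then some x else some m) (some a) y
        = if key y < key a then some y else some a := by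
      intro a y
      by_cases h : key y < key a <;> simp [h]
    rcases List.mem_cons.mp hm with rfl | hmt
    · refine pvMinStay key _ hf m t ?_
      intro p hp
      rcases hmin p (by simp [hp]) with h | ⟨h1, _⟩ <;> omega
    · have hkx : key m < key x := by
        rcases hmin x (by simp) with h | ⟨h1, h2⟩
        · exact h
        · exfalso
          have : pos x < pos m := (List.pairwise_cons.mp hl).1 m hmt
          omega
      exact pvMinGo key pos _ hf t x m (List.pairwise_cons.mp hl).2 hmt hkx
        (fun p hp => hmin p (by simp [hp]))

-- ===== the loop invariants =====

def pvI1 (idx cur : PySem.Dict Int Int) : Prop :=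
  List.Pairwise (fun a b => idx.getD a 0 < idx.getD b 0) cur.keys

def pvI2 (idx cur : PySem.Dict Int Int) (pq : List (Int × Int × Int)) : Prop :=
  ∀ p ∈ cur.items, (p.2, idx.getD p.1 0, p.1) ∈ pq

def pvI3 (idx : PySem.Dict Int Int) (pq : List (Int × Int × Int)) : Prop :=
  ∀ x ∈ pq, x.2.1 = idx.getD x.2.2 0

theorem pvI1_nodup {idx cur : PySem.Dict Int Int} (h : pvI1 idx cur) : cur.keys.Nodup := by
  refine h.imp ?_
  intro a b hlt he
  rw [he] at hlt
  exact lt_irrefl _ hlt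

theorem pvKeys_erase (cur : PySem.Dict Int Int) (v : Int) :
    (cur.erase v).keys = cur.keys.filter (fun k => !(k == v)) := by
  show (List.filter (fun p => !(p.1 == v)) cur.items).map (fun x => x.1)
      = (cur.items.map (fun x => x.1)).filter (fun k => !(k == v))
  rw [List.filter_map]
  rfl

theorem pvMem_items_erase {cur : PySem.Dict Int Int} {v : Int} {p : Int × Int}
    (h : p ∈ (cur.erase v).items) : p ∈ cur.items ∧ p.1 ≠ v := by
  simp only [PySem.Dict.erase, List.mem_filter] at h
  exact ⟨h.1, by simpa using h.2⟩

theorem pvSumFilter (f : Int → Nat) :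
    ∀ (ks : List Int) (v : Int), ks.Nodup → v ∈ ks →
    (ks.map f).sum = ((ks.filter (fun k => !(k == v))).map f).sum + f v := by
  intro ks
  induction ks with
  | nil => intro v _ h; cases h
  | cons a t ih =>
    intro v hnd hv
    rcases List.mem_cons.mp hv with rfl | hvt
    · have hvt : v ∉ t := (List.nodup_cons.mp hnd).1
      have hft : t.filter (fun k => !(k == v)) = t := by
        rw [List.filter_eq_self]
        intro b hb
        simp only [Bool.not_eq_eq_eq_not, Bool.not_true, beq_eq_false_iff_ne, ne_eq]
        intro hbv
        exact hvt (hbv ▸ hb)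
      simp [hft]
      omega
    · have hav : a ≠ v := by
        intro h
        exact (List.nodup_cons.mp hnd).1 (h ▸ hvt)
      have := ih v (List.nodup_cons.mp hnd).2 hvt
      simp [hav]
      omega

-- one unit of weight per live key; removing a live key removes exactly its unit
theorem pvW_erase (Gd : PySem.Dict Int (List Int)) (cur : PySem.Dict Int Int) (v : Int)
    (hnd : cur.keys.Nodup) (hv : cur.contains v = true) :
    pvW Gd cur = pvW Gd (cur.erase v) + (1 + (Gd.getD v []).length) := by
  unfold pvW
  rw [pvKeys_erase]
  exact pvSumFilter (fun k => 1 + (Gd.getD k []).length) cur.keys v hnd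
    ((PySem.Dict.contains_iff_mem_keys cur v).mp hv)

theorem pvW_keys_eq (Gd : PySem.Dict Int (List Int)) {cur cur' : PySem.Dict Int Int}
    (h : cur'.keys = cur.keys) : pvW Gd cur' = pvW Gd cur := by
  simp [pvW, h]

-- the inner for-loop: B's dict component evolves exactly as A's, and the invariants survive
theorem pvFoldB_inv (Gd : PySem.Dict Int (List Int)) (idx : PySem.Dict Int Int) (L : List Int) :
    ∀ (cur : PySem.Dict Int Int) (pq : List (Int × Int × Int)),
    pvI2 idx cur pq → pvI3 idx pq → PQSorted pq →
    (L.foldl (fun (s : PySem.Dict Int Int × List (Int × Int × Int)) u =>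
        if s.1.contains u = true then
          (s.1.modify u 0 (fun x => x - 1),
            pvPush s.2 ((s.1.modify u 0 (fun x => x - 1)).getD u 0, idx.getD u 0, u))
        else s) (cur, pq)).1
      = L.foldl (fun d i => if d.contains i = true then d.modify i 0 (fun x => x - 1) else d) cur ∧
    ((L.foldl (fun (s : PySem.Dict Int Int × List (Int × Int × Int)) u =>
        if s.1.contains u = true then
          (s.1.modify u 0 (fun x => x - 1),
            pvPush s.2 ((s.1.modify u 0 (fun x => x - 1)).getD u 0, idx.getD u 0, u))
        else s) (cur, pq)).1.keys = cur.keys ∧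
     pvI2 idx (L.foldl (fun (s : PySem.Dict Int Int × List (Int × Int × Int)) u =>
        if s.1.contains u = true then
          (s.1.modify u 0 (fun x => x - 1),
            pvPush s.2 ((s.1.modify u 0 (fun x => x - 1)).getD u 0, idx.getD u 0, u))
        else s) (cur, pq)).1 (L.foldl (fun (s : PySem.Dict Int Int × List (Int × Int × Int)) u =>
        if s.1.contains u = true then
          (s.1.modify u 0 (fun x => x - 1),
            pvPush s.2 ((s.1.modify u 0 (fun x => x - 1)).getD u 0, idx.getD u 0, u))
        else s) (cur, pq)).2 ∧
     pvI3 idx (L.foldl (fun (s : PySem.Dict Int Int × List (Int × Int × Int)) u =>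
        if s.1.contains u = true then
          (s.1.modify u 0 (fun x => x - 1),
            pvPush s.2 ((s.1.modify u 0 (fun x => x - 1)).getD u 0, idx.getD u 0, u))
        else s) (cur, pq)).2 ∧
     PQSorted (L.foldl (fun (s : PySem.Dict Int Int × List (Int × Int × Int)) u =>
        if s.1.contains u = true then
          (s.1.modify u 0 (fun x => x - 1),
            pvPush s.2 ((s.1.modify u 0 (fun x => x - 1)).getD u 0, idx.getD u 0, u))
        else s) (cur, pq)).2 ∧
     (L.foldl (fun (s : PySem.Dict Int Int × List (Int × Int × Int)) u =>
        if s.1.contains u = true then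
          (s.1.modify u 0 (fun x => x - 1),
            pvPush s.2 ((s.1.modify u 0 (fun x => x - 1)).getD u 0, idx.getD u 0, u))
        else s) (cur, pq)).2.length ≤ pq.length + L.length) := by
  induction L with
  | nil =>
    intro cur pq h2 h3 h4
    exact ⟨rfl, rfl, h2, h3, h4, by simp⟩
  | cons u t ih =>
    intro cur pq h2 h3 h4
    simp only [List.foldl_cons]
    by_cases hc : cur.contains u = true
    · rw [if_pos hc, if_pos hc]
      set cur' := cur.modify u 0 (fun x => x - 1) with hcur'
      set e' : Int × Int × Int := (cur'.getD u 0, idx.getD u 0, u) with he'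
      have hkeys' : cur'.keys = cur.keys := by
        rw [hcur', PySem.Dict.keys_modify, PySem.Dict.keys_insert_of_contains cur _ hc]
      have h2' : pvI2 idx cur' (pvPush pq e') := by
        intro p hp
        have hp' : p = (u, cur.getD u 0 - 1) ∨ (p ∈ cur.items ∧ p.1 ≠ u) :=
          (PySem.Dict.mem_items_insert cur u (cur.getD u 0 - 1) p).mp hp
        rcases hp' with rfl | ⟨hpi, hpne⟩
        · rw [mem_pvPush]
          left
          have hself : cur'.getD u 0 = cur.getD u 0 - 1 := PySem.Dict.getD_modify_self cur u 0 _
          rw [he', hself]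
        · rw [mem_pvPush]
          exact Or.inr (h2 p hpi)
      have h3' : pvI3 idx (pvPush pq e') := by
        intro x hx
        rcases (mem_pvPush pq e' x).mp hx with rfl | hxo
        · rfl
        · exact h3 x hxo
      have h4' : PQSorted (pvPush pq e') := pvPush_sorted pq e' h4
      obtain ⟨hfst, hkeys, hI2, hI3, hsort, hlen⟩ := ih cur' (pvPush pq e') h2' h3' h4'
      rw [length_pvPush] at hlen
      refine ⟨hfst, hkeys.trans hkeys', hI2, hI3, hsort, ?_⟩
      simp only [List.length_cons]
      omega
    · rw [if_neg hc, if_neg hc]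
      obtain ⟨hfst, hkeys, hI2, hI3, hsort, hlen⟩ := ih cur pq h2 h3 h4
      refine ⟨hfst, hkeys, hI2, hI3, hsort, ?_⟩
      simp only [List.length_cons]
      omega

-- the two loops compute the same ordering, given the invariants
theorem pvLoopBA (Gd : PySem.Dict Int (List Int)) (idx : PySem.Dict Int Int) :
    ∀ (fuel : Nat) (cur : PySem.Dict Int Int) (pq : List (Int × Int × Int)) (acc : List Int),
    pvI1 idx cur → pvI2 idx cur pq → pvI3 idx pq → PQSorted pq →
    pq.length + pvW Gd cur ≤ fuel →
    pvLoopB Gd idx fuel cur pq acc = pvDegLoopA Gd cur acc := by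
  intro fuel
  induction fuel with
  | zero =>
    intro cur pq acc h1 h2 h3 h4 hf
    have hW : pvW Gd cur = 0 := by omega
    have hkeys : cur.keys = [] := by
      cases hk : cur.keys with
      | nil => rfl
      | cons k t =>
        exfalso
        unfold pvW at hW
        rw [hk] at hW
        simp at hW
    have hitems : cur.items = [] := by
      cases hi : cur.items with
      | nil => rfl
      | cons p t =>
        exfalso
        have hck : cur.keys = p.1 :: t.map (fun x => x.1) := by
          show cur.items.map (fun x => x.1) = _
          rw [hi, List.map_cons]
        rw [hkeys] at hck
        cases hck
    rw [pvDegLoopA.eq_def, hitems]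
    simp [PySem.List.min?, pvLoopB]
  | succ fuel ih =>
    intro cur pq acc h1 h2 h3 h4 hf
    by_cases hsz : cur.size = 0
    · have hitems : cur.items = [] := List.length_eq_zero_iff.mp hsz
      rw [pvDegLoopA.eq_def, hitems]
      simp [PySem.List.min?, pvLoopB, hsz]
    · have hitems_ne : cur.items ≠ [] := fun h => hsz (by simp [PySem.Dict.size, h])
      have hpq_ne : pq ≠ [] := by
        obtain ⟨p, hp⟩ := List.exists_mem_of_ne_nil cur.items hitems_ne
        intro h
        have := h2 p hp
        rw [h] at this
        cases this
      obtain ⟨ys, e, rfl⟩ := (List.eq_nil_or_concat pq).resolve_left hpq_ne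
      rw [List.concat_eq_append] at h2 h3 h4 hf
      have hnd := pvI1_nodup h1
      simp only [pvLoopB, List.concat_eq_append, List.getLast?_concat, List.dropLast_concat,
        if_neg hsz]
      by_cases hstale : (!(cur.contains e.2.2) || !(e.1 == cur.getD e.2.2 0)) = true
      · rw [if_pos hstale]
        refine ih cur ys acc h1 ?_ ?_ ?_ ?_
        · intro p hp
          have hmem := h2 p hp
          rcases List.mem_append.mp hmem with h | h
          · exact h
          · exfalso
            simp only [List.mem_singleton] at h
            have hpk : p.1 ∈ cur.keys := List.mem_map_of_mem hp
            have hc : cur.contains p.1 = true := (PySem.Dict.contains_iff_mem_keys cur p.1).mpr hpk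
            have hg : cur.getD p.1 0 = p.2 := PySem.Dict.getD_of_mem_items _ hp hnd 0
            rw [← h] at hstale
            simp [hc, hg] at hstale
        · intro x hx
          exact h3 x (by simp [hx])
        · exact List.Pairwise.sublist (List.sublist_append_left ys [e]) h4
        · simp only [List.length_append, List.length_singleton] at hf
          omega
      · rw [if_neg hstale]
        simp only [Bool.or_eq_true, Bool.not_eq_true', beq_eq_false_iff_ne, ne_eq, not_or,
          Bool.not_eq_false, not_not] at hstale
        obtain ⟨hc, hg⟩ := hstale
        obtain ⟨w, hw⟩ : ∃ w, cur.get? e.2.2 = some w := by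
          have hiso := PySem.Dict.contains_eq_isSome_get? cur e.2.2
          rw [hc] at hiso
          cases hq : cur.get? e.2.2 with
          | none => rw [hq] at hiso; simp at hiso
          | some w => exact ⟨w, rfl⟩
        have hpmem : (e.2.2, w) ∈ cur.items := PySem.Dict.mem_items_of_get?_eq_some cur hw
        have hgw : cur.getD e.2.2 0 = w := PySem.Dict.getD_of_get?_eq_some cur 0 hw
        have hew : e.1 = w := by rw [hg, hgw]
        have hepq : e ∈ ys ++ [e] := by simp
        have hei : e.2.1 = idx.getD e.2.2 0 := h3 e hepq
        have hmin_pq : ∀ x ∈ ys ++ [e], pvKey e ≤ pvKey x := by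
          intro x hx
          rcases List.mem_append.mp hx with hxy | hxe
          · exact (List.pairwise_append.mp h4).2.2 x hxy e (by simp)
          · simp only [List.mem_singleton] at hxe
            exact le_of_eq (by rw [hxe])
        have hmin : PySem.List.min? cur.items (fun x => x.2) = some (e.2.2, w) := by
          refine pvMinFirst (fun p => p.2) (fun p => idx.getD p.1 0) cur.items (e.2.2, w)
            ?_ hpmem ?_
          · have h1' : List.Pairwise (fun a b => idx.getD a 0 < idx.getD b 0)
                (cur.items.map (fun x => x.1)) := h1
            exact (List.pairwise_map (f := fun x : Int × Int => x.1)).mp h1'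
          · intro p hp
            have hent := h2 p hp
            have hle := hmin_pq _ hent
            simp only [pvKey, Prod.Lex.le_iff, ofLex_toLex] at hle
            rcases hle with hlt | ⟨heq, hin⟩
            · left
              show w < p.2
              rw [← hew]
              exact hlt
            · rcases hin with hlt2 | ⟨heq2, _⟩
              · right
                refine ⟨by show w = p.2; rw [← hew]; exact heq, ?_⟩
                show idx.getD e.2.2 0 ≤ idx.getD p.1 0
                rw [← hei]
                exact le_of_lt hlt2
              · right
                refine ⟨by show w = p.2; rw [← hew]; exact heq, ?_⟩
                show idx.getD e.2.2 0 ≤ idx.getD p.1 0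
                rw [← hei, heq2]
        rw [pvDegLoopA.eq_def]
        split
        · next hnone => rw [hmin] at hnone; cases hnone
        · next m hsome =>
          rw [hmin] at hsome
          injection hsome with hsome
          subst hsome
          dsimp only
          have h1e : pvI1 idx (cur.erase e.2.2) := by
            unfold pvI1
            rw [pvKeys_erase]
            exact List.Pairwise.sublist List.filter_sublist h1
          have h2e : pvI2 idx (cur.erase e.2.2) ys := by
            intro p hp
            obtain ⟨hpi, hpne⟩ := pvMem_items_erase hp
            have hmem := h2 p hpi
            rcases List.mem_append.mp hmem with h | h
            · exact h
            · exfalso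
              simp only [List.mem_singleton] at h
              exact hpne (by rw [← h])
          have h3e : pvI3 idx ys := fun x hx => h3 x (by simp [hx])
          have h4e : PQSorted ys := List.Pairwise.sublist (List.sublist_append_left ys [e]) h4
          obtain ⟨hfst, hkeys, hI2, hI3, hsort, hlen⟩ :=
            pvFoldB_inv Gd idx (Gd.getD e.2.2 []) (cur.erase e.2.2) ys h2e h3e h4e
          have h1s : pvI1 idx (((Gd.getD e.2.2 []).foldl
              (fun (s : PySem.Dict Int Int × List (Int × Int × Int)) u =>
                if s.1.contains u = true then
                  (s.1.modify u 0 (fun x => x - 1),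
                    pvPush s.2 ((s.1.modify u 0 (fun x => x - 1)).getD u 0, idx.getD u 0, u))
                else s) (cur.erase e.2.2, ys)).1) := by
            unfold pvI1
            rw [hkeys]
            exact h1e
          have hWer := pvW_erase Gd cur e.2.2 hnd hc
          have hWs := pvW_keys_eq Gd hkeys
          have hfuel : (((Gd.getD e.2.2 []).foldl
              (fun (s : PySem.Dict Int Int × List (Int × Int × Int)) u =>
                if s.1.contains u = true then
                  (s.1.modify u 0 (fun x => x - 1),
                    pvPush s.2 ((s.1.modify u 0 (fun x => x - 1)).getD u 0, idx.getD u 0, u))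
                else s) (cur.erase e.2.2, ys)).2).length
              + pvW Gd (((Gd.getD e.2.2 []).foldl
              (fun (s : PySem.Dict Int Int × List (Int × Int × Int)) u =>
                if s.1.contains u = true then
                  (s.1.modify u 0 (fun x => x - 1),
                    pvPush s.2 ((s.1.modify u 0 (fun x => x - 1)).getD u 0, idx.getD u 0, u))
                else s) (cur.erase e.2.2, ys)).1) ≤ fuel := by
            rw [hWs]
            simp only [List.length_append, List.length_singleton] at hf
            omega
          have hrec := ih _ _ (acc ++ [e.2.2]) h1s hI2 hI3 hsort hfuel
          rw [hrec, hfst]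

-- ===== initial-state lemmas =====

theorem pvBuild (l : List (Int × List Int)) (d : PySem.Dict Int Int)
    (hfresh : ∀ p ∈ l, d.contains p.1 = false) (hnd : (l.map Prod.fst).Nodup) :
    (l.foldl (fun d p => d.insert p.1 ((p.2.length : Int))) d).items
    = d.items ++ l.map (fun p => (p.1, (p.2.length : Int))) := by
  induction l generalizing d with
  | nil => simp
  | cons p t ih =>
    simp only [List.foldl_cons, List.map_cons]
    have hp : d.contains p.1 = false := hfresh p (by simp)
    rw [ih]
    · simp [PySem.Dict.insert, hp]
    · intro q hq
      rw [PySem.Dict.contains_insert]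
      have hne : q.1 ≠ p.1 := by
        intro hcon
        have : p.1 ∈ t.map Prod.fst := hcon ▸ List.mem_map_of_mem hq
        simp only [List.map_cons, List.nodup_cons] at hnd
        exact hnd.1 this
      simp [hne, hfresh q (by simp [hq])]
    · simpa using hnd.of_cons

theorem pvIdxBuild (ks : List Int) :
    ∀ (d : PySem.Dict Int Int), ks.Nodup → (∀ v ∈ ks, d.contains v = false) →
    (ks.foldl (fun d v => d.insert v ((d.size : Int))) d).items
      = d.items ++ (PySem.List.enumerate ks (d.size : Int)).map (fun p => (p.2, p.1)) := by
  induction ks with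
  | nil => intro d _ _; simp [PySem.List.enumerate_nil]
  | cons v t ih =>
    intro d hnd hfresh
    simp only [List.foldl_cons]
    have hv : d.contains v = false := hfresh v (by simp)
    have hins : (d.insert v ((d.size : Int))).items = d.items ++ [(v, (d.size : Int))] := by
      simp [PySem.Dict.insert, hv]
    have hsize : (d.insert v ((d.size : Int))).size = d.size + 1 := by
      show (d.insert v ((d.size : Int))).items.length = d.items.length + 1
      rw [hins]
      simp
    rw [ih (d.insert v ((d.size : Int))) (List.nodup_cons.mp hnd).2 ?_]
    · rw [hins, hsize, PySem.List.enumerate_cons]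
      simp only [List.map_cons, List.append_assoc, List.singleton_append]
      norm_num
    · intro u hu
      rw [PySem.Dict.contains_insert]
      have hne : u ≠ v := by
        intro h
        exact (List.nodup_cons.mp hnd).1 (h ▸ hu)
      simp [hne, hfresh u (by simp [hu])]

theorem pvIdx_pairwise (ks : List Int) (hnd : ks.Nodup) :
    List.Pairwise (fun a b =>
        (ks.foldl (fun d v => d.insert v ((d.size : Int))) PySem.Dict.empty).getD a 0
      < (ks.foldl (fun d v => d.insert v ((d.size : Int))) PySem.Dict.empty).getD b 0) ks := by
  set idx := ks.foldl (fun d v => d.insert v ((d.size : Int))) PySem.Dict.empty with hidx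
  have hitems : idx.items = (PySem.List.enumerate ks (0 : Int)).map (fun p => (p.2, p.1)) := by
    rw [hidx, pvIdxBuild ks PySem.Dict.empty hnd (fun v _ => rfl)]
    rfl
  have hkeys : idx.keys = ks := by
    show idx.items.map (fun x => x.1) = ks
    rw [hitems, List.map_map]
    have hcomp : ((fun x : Int × Int => x.1) ∘ fun p : Int × Int => (p.2, p.1))
        = (fun p : Int × Int => p.2) := rfl
    rw [hcomp]
    exact PySem.List.map_snd_enumerate ks 0
  have hnodk : idx.keys.Nodup := hkeys ▸ hnd
  have hget : ∀ (j : Nat) (hj : j < ks.length), idx.getD ks[j] 0 = (j : Int) := by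
    intro j hj
    have hjlt : j < (PySem.List.enumerate ks (0 : Int)).length := by
      rw [PySem.List.length_enumerate]; exact hj
    have hje : (PySem.List.enumerate ks (0 : Int))[j] = ((0 : Int) + j, ks[j]) :=
      PySem.List.getElem_enumerate ks 0 j hjlt
    have hm : (ks[j], (j : Int)) ∈ idx.items := by
      rw [hitems]
      refine List.mem_map.mpr ⟨((0 : Int) + j, ks[j]), ?_, by simp⟩
      rw [← hje]
      exact List.getElem_mem hjlt
    exact PySem.Dict.getD_of_mem_items _ hm hnodk 0
  rw [List.pairwise_iff_getElem]
  intro i j hi hj hij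
  rw [hget i hi, hget j hj]
  exact_mod_cast hij

theorem pvInitPQ_mem (idx : PySem.Dict Int Int) (l : List (Int × Int)) :
    ∀ (pq : List (Int × Int × Int)) (x : Int × Int × Int),
    (x ∈ pq ∨ (∃ p ∈ l, x = (p.2, idx.getD p.1 0, p.1))) →
    x ∈ l.foldl (fun pq p => pvPush pq (p.2, idx.getD p.1 0, p.1)) pq := by
  induction l with
  | nil =>
    intro pq x h
    rcases h with h | ⟨p, hp, _⟩
    · exact h
    · cases hp
  | cons q t ih =>
    intro pq x h
    simp only [List.foldl_cons]
    rcases h with h | ⟨p, hp, rfl⟩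
    · exact ih _ x (Or.inl ((mem_pvPush _ _ x).mpr (Or.inr h)))
    · rcases List.mem_cons.mp hp with rfl | hpt
      · exact ih _ _ (Or.inl ((mem_pvPush _ _ _).mpr (Or.inl rfl)))
      · exact ih _ _ (Or.inr ⟨p, hpt, rfl⟩)

theorem pvInitPQ_sound (idx : PySem.Dict Int Int) (l : List (Int × Int)) :
    ∀ (pq : List (Int × Int × Int)), pvI3 idx pq → PQSorted pq →
    pvI3 idx (l.foldl (fun pq p => pvPush pq (p.2, idx.getD p.1 0, p.1)) pq) ∧
    PQSorted (l.foldl (fun pq p => pvPush pq (p.2, idx.getD p.1 0, p.1)) pq) := by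
  induction l with
  | nil => intro pq h3 h4; exact ⟨h3, h4⟩
  | cons q t ih =>
    intro pq h3 h4
    simp only [List.foldl_cons]
    refine ih _ ?_ (pvPush_sorted _ _ h4)
    intro x hx
    rcases (mem_pvPush _ _ x).mp hx with rfl | hxo
    · rfl
    · exact h3 x hxo

-- ===== VERDICT (by name: the statement is the Claim_ definition above) =====
theorem degeneracy_ordering_spec : Claim_equal_degeneracy_ordering := by
  intro G _hdom
  unfold Spec_degeneracy_ordering degeneracy_ordering degeneracy_ordering_alt
  show pvDegLoopA (PySem.Dict.ofList G)
      ((PySem.Dict.ofList G).items.foldl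
        (fun d p => d.insert p.1 ((p.2.length : Int))) PySem.Dict.empty) []
    = pvLoopB (PySem.Dict.ofList G)
        ((PySem.Dict.ofList G).keys.foldl (fun d v => d.insert v ((d.size : Int))) PySem.Dict.empty)
        ((((PySem.Dict.ofList G).items.foldl
            (fun d p => d.insert p.1 ((p.2.length : Int))) PySem.Dict.empty).items.foldl
          (fun pq p => pvPush pq (p.2,
            ((PySem.Dict.ofList G).keys.foldl (fun d v => d.insert v ((d.size : Int)))
              PySem.Dict.empty).getD p.1 0, p.1)) []).length
          + pvW (PySem.Dict.ofList G)
            ((PySem.Dict.ofList G).items.foldl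
              (fun d p => d.insert p.1 ((p.2.length : Int))) PySem.Dict.empty))
        ((PySem.Dict.ofList G).items.foldl
          (fun d p => d.insert p.1 ((p.2.length : Int))) PySem.Dict.empty)
        (((PySem.Dict.ofList G).items.foldl
            (fun d p => d.insert p.1 ((p.2.length : Int))) PySem.Dict.empty).items.foldl
          (fun pq p => pvPush pq (p.2,
            ((PySem.Dict.ofList G).keys.foldl (fun d v => d.insert v ((d.size : Int)))
              PySem.Dict.empty).getD p.1 0, p.1)) [])
        []
  set Gd := PySem.Dict.ofList G with hGd
  set idx := Gd.keys.foldl (fun d v => d.insert v ((d.size : Int))) PySem.Dict.empty with hidx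
  set cur := Gd.items.foldl (fun d p => d.insert p.1 ((p.2.length : Int))) PySem.Dict.empty with hcur
  set pq := cur.items.foldl (fun pq p => pvPush pq (p.2, idx.getD p.1 0, p.1))
    ([] : List (Int × Int × Int)) with hpq
  have hnd : Gd.keys.Nodup := PySem.Dict.nodup_keys_ofList G
  have hcuritems : cur.items = Gd.items.map (fun p => (p.1, (p.2.length : Int))) := by
    rw [hcur, pvBuild Gd.items PySem.Dict.empty (fun p _ => rfl)
      (by simpa [PySem.Dict.keys] using hnd)]
    rfl
  have hkeyscur : cur.keys = Gd.keys := by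
    show cur.items.map (fun x => x.1) = Gd.keys
    rw [hcuritems, List.map_map]
    rfl
  have h1 : pvI1 idx cur := by
    unfold pvI1
    rw [hkeyscur, hidx]
    exact pvIdx_pairwise Gd.keys hnd
  have h2 : pvI2 idx cur pq := by
    intro p hp
    rw [hpq]
    exact pvInitPQ_mem idx cur.items [] _ (Or.inr ⟨p, hp, rfl⟩)
  have hsound := pvInitPQ_sound idx cur.items []
    (fun x hx => absurd hx List.not_mem_nil) List.Pairwise.nil
  rw [← hpq] at hsound
  exact (pvLoopBA Gd idx (pq.length + pvW Gd cur) cur pq [] h1 h2 hsound.1 hsound.2 le_rfl).symm
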